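-- pv_equiv track=rewrite | github.com/geomlyd/math_solutions | erickson_algo/dyn_prog/ex2.py | can_part
-- ===== SOURCE A (Python) =====
-- def can_part(A, B):
--     assert len(A) == len(B)
--     memo = [False for _ in range(len(A) + 1)]
--     memo[len(A)] = True
--     for i in range(len(A) - 1, -1, -1):
--         for k in range(i, len(A)):
--             substr1 = A[i:k + 1]
--             substr2 = B[i:k + 1]
--             if(substr1 not in words or substr2 not in words):
--                 continue
--             if(memo[k + 1]):
--                 memo[i] = True
--                 break #short-circuit evaluation of the "or"
--     return memo[0]
--
-- words = {"BOT", "HEART", "HAND", "SAT", "URNS", "PIN",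
--          "EAR", "ART", "THE", "HANDS", "SATURN", "SATURNS", "TURN", "TURNS",
--          "SPIN", "IN", "A", "PINNED", "NED",
--          "PIN", "PINS", "START", "TRAP", "TRAPS", "SAND", "AND", "SANDRA",
--          "RAG", "RAGS", "SLAP", "LAP", "RAP", "RAPS", "LAPTOP", "TOP"}
-- ===== SOURCE B (Python) =====
-- words = {"BOT", "HEART", "HAND", "SAT", "URNS", "PIN",
--          "EAR", "ART", "THE", "HANDS", "SATURN", "SATURNS", "TURN", "TURNS",
--          "SPIN", "IN", "A", "PINNED", "NED",
--          "PIN", "PINS", "START", "TRAP", "TRAPS", "SAND", "AND", "SANDRA",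
--          "RAG", "RAGS", "SLAP", "LAP", "RAP", "RAPS", "LAPTOP", "TOP"}
--
--
-- def can_part(A, B):
--     assert len(A) == len(B)
--     # dp[m] = True iff the last m characters of both strings split into dictionary words.
--     # Built back-to-front; the inner scan is capped by the longest dictionary word.
--     wmax = max(map(len, words))
--     n = len(A)
--     dp = [True]
--     for m in range(1, n + 1):
--         i = n - m
--         dp.append(any(A[i:i + l] in words and B[i:i + l] in words and dp[m - l]
--                       for l in range(1, min(wmax, m) + 1)))
--     return dp[n]
-- ===== Notes on version B (the rewrite author's own statement) =====
-- stated objective: faster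
-- what changed: Replaces the O(n^2)-iteration backward table with break-based inner scans by a single forward pass that appends suffix-splittability values back-to-front and caps the inner any() at the longest dictionary word, so each position does constant bounded work.
import Mathlib
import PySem

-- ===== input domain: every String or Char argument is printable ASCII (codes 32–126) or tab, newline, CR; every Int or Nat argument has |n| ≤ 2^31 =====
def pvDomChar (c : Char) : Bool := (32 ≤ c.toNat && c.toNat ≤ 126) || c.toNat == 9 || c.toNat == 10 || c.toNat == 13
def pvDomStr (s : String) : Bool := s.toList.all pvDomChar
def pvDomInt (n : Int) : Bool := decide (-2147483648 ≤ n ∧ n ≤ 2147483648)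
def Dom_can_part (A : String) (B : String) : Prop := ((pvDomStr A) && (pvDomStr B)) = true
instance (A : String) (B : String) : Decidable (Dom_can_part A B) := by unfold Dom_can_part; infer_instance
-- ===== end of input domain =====

-- B replaces A's backward table with full inner scans by a forward append-only pass whose inner
-- any() is capped at the longest dictionary word (objective: faster).

set_option maxRecDepth 100000


-- ===== PORT A =====
-- the module-level constant 'words' (a Python set of string literals), shared by both ports
def words : List (List Char) := PySem.Set.ofList
  (["BOT","HEART","HAND","SAT","URNS","PIN","EAR","ART","THE","HANDS","SATURN",
    "SATURNS","TURN","TURNS","SPIN","IN","A","PINNED","NED","PIN","PINS","START",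
    "TRAP","TRAPS","SAND","AND","SANDRA","RAG","RAGS","SLAP","LAP","RAP","RAPS",
    "LAPTOP","TOP"].map String.toList)

-- A's inner 'for k in range(i, len(A))' loop with its 'continue' and 'break';
-- all list indices reached are nonnegative and in range, so List.getD/List.set are exact here
def can_part_inner (a b : List Char) (memo : List Bool) (i : Nat) : List Nat → List Bool
  | [] => memo
  | k :: ks =>
    let s1 := PySem.List.slice a (some (i : Int)) (some ((k : Int) + 1))
    let s2 := PySem.List.slice b (some (i : Int)) (some ((k : Int) + 1))
    if !(words.contains s1) || !(words.contains s2) then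
      can_part_inner a b memo i ks
    else if memo.getD (k + 1) false then memo.set i true
    else can_part_inner a b memo i ks

-- A's outer 'for i in range(len(A)-1, -1, -1)' loop: outer m processes i = m-1, m-2, …, 0
def can_part_outer (a b : List Char) (n : Nat) : Nat → List Bool → List Bool
  | 0, memo => memo
  | m + 1, memo => can_part_outer a b n m (can_part_inner a b memo m (List.range' m (n - m)))

-- 'assert len(A) == len(B)' raises AssertionError on unequal lengths: excluded by Pre_can_part
def can_part (A : String) (B : String) : Bool :=
  let a := A.toList
  let b := B.toList
  let n := a.length
  let memo := (List.replicate (n + 1) false).set n true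
  (can_part_outer a b n n memo).getD 0 false

-- ===== PORT B =====
def can_part_alt (A : String) (B : String) : Bool :=
  let a := A.toList
  let b := B.toList
  let wmax := ((words.map List.length).max?).getD 0
  let n := a.length
  let dp := (List.range' 1 n).foldl (fun dp m =>
    let i := n - m
    dp ++ [((List.range' 1 (min wmax m)).any (fun l =>
        words.contains (PySem.List.slice a (some (i : Int)) (some ((i : Int) + (l : Int)))) &&
        words.contains (PySem.List.slice b (some (i : Int)) (some ((i : Int) + (l : Int)))) &&
        dp.getD (m - l) false))]) [true]
  dp.getD n false

-- ===== PRECONDITION & SPEC =====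
-- A asserts len(A) == len(B) and raises AssertionError otherwise: exactly those inputs are excluded.
def Pre_can_part (A : String) (B : String) : Prop := A.toList.length = B.toList.length
instance (A : String) (B : String) : Decidable (Pre_can_part A B) := by unfold Pre_can_part; infer_instance
def pvWitness_can_part : String × String := ("SATURN", "TRAPSA")

def Spec_can_part (A : String) (B : String) (out : Bool) : Prop := out = can_part_alt A B
instance (A : String) (B : String) (out : Bool) : Decidable (Spec_can_part A B out) := by unfold Spec_can_part; infer_instance

-- ===== CLAIM (what is proved, stated in full; the proofs are below) =====
def Claim_equal_can_part : Prop := ∀ (A : String) (B : String), Dom_can_part A B → Pre_can_part A B → Spec_can_part A B (can_part A B)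

-- ===== LEMMAS AND PROOFS =====

set_option maxRecDepth 40000 in
theorem words_short : ∀ w ∈ words, w.length ≤ 7 := by decide

theorem contains_long (s : List Char) (h : 7 < s.length) : words.contains s = false := by
  rw [Bool.eq_false_iff]
  intro hc
  have := words_short s (List.contains_iff_mem.mp hc)
  omega

theorem wmax_eq : ((words.map List.length).max?).getD 0 = 7 := by decide

-- "A[i:i+l] in words and B[i:i+l] in words" for the word of length l starting at i
def condW (a b : List Char) (i l : Nat) : Bool :=
  words.contains (PySem.List.slice a (some (i : Int)) (some ((i : Int) + (l : Int)))) &&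
  words.contains (PySem.List.slice b (some (i : Int)) (some ((i : Int) + (l : Int))))

-- the same condition expressed through the right endpoint k (A's view): A[i:k+1], B[i:k+1]
def condK (a b : List Char) (i kk : Nat) : Bool :=
  words.contains (PySem.List.slice a (some (i : Int)) (some ((kk : Int) + 1))) &&
  words.contains (PySem.List.slice b (some (i : Int)) (some ((kk : Int) + 1)))

-- spec table: (splitTab a b n m).getD j = "the last j characters of both strings split into words"
def splitTab (a b : List Char) (n : Nat) : Nat → List Bool
  | 0 => [true]
  | m + 1 =>
      splitTab a b n m ++ [(List.range' 1 (m + 1)).any (fun l =>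
        condW a b (n - (m + 1)) l && (splitTab a b n m).getD (m + 1 - l) false)]

def splitF (a b : List Char) (n m : Nat) : Bool := (splitTab a b n m).getD m false

theorem getD_append_lt (t l' : List Bool) (j : Nat) (h : j < t.length) :
    (t ++ l').getD j false = t.getD j false := by
  rw [List.getD_eq_getElem?_getD, List.getElem?_append_left h, ← List.getD_eq_getElem?_getD]

theorem getD_append_at (t : List Bool) (x : Bool) (j : Nat) (h : j = t.length) :
    (t ++ [x]).getD j false = x := by
  subst h
  rw [List.getD_eq_getElem?_getD, List.getElem?_append_right (le_refl _)]
  simp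

theorem getD_set_self (l : List Bool) (i : Nat) (v : Bool) (h : i < l.length) :
    (l.set i v).getD i false = v := by
  simp [List.getD_eq_getElem?_getD, h]

theorem getD_set_ne (l : List Bool) (i j : Nat) (v : Bool) (h : i ≠ j) :
    (l.set i v).getD j false = l.getD j false := by
  simp [List.getD_eq_getElem?_getD, h]

theorem splitTab_length (a b : List Char) (n : Nat) : ∀ m, (splitTab a b n m).length = m + 1
  | 0 => rfl
  | m + 1 => by simp [splitTab, splitTab_length a b n m]

theorem splitF_zero (a b : List Char) (n : Nat) : splitF a b n 0 = true := rfl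

theorem splitF_succ_tab (a b : List Char) (n m : Nat) :
    splitF a b n (m + 1) = (List.range' 1 (m + 1)).any (fun l =>
      condW a b (n - (m + 1)) l && (splitTab a b n m).getD (m + 1 - l) false) := by
  have h1 : splitF a b n (m + 1) = (splitTab a b n (m + 1)).getD (m + 1) false := rfl
  rw [h1]
  conv_lhs => rw [splitTab]
  exact getD_append_at _ _ _ (splitTab_length a b n m).symm

theorem splitTab_getD (a b : List Char) (n : Nat) :
    ∀ m j, j ≤ m → (splitTab a b n m).getD j false = splitF a b n j := by
  intro m
  induction m with
  | zero =>
    intro j hj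
    have : j = 0 := by omega
    subst this
    rfl
  | succ m ih =>
    intro j hj
    by_cases hjm : j ≤ m
    · conv_lhs => rw [splitTab]
      rw [getD_append_lt _ _ _ (by rw [splitTab_length]; omega)]
      exact ih j hjm
    · have : j = m + 1 := by omega
      subst this
      rfl

theorem splitF_succ (a b : List Char) (n m : Nat) :
    splitF a b n (m + 1) = (List.range' 1 (m + 1)).any (fun l =>
      condW a b (n - (m + 1)) l && splitF a b n (m + 1 - l)) := by
  rw [splitF_succ_tab]
  apply Bool.eq_iff_iff.mpr
  simp only [List.any_eq_true, List.mem_range'_1, Bool.and_eq_true]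
  constructor
  · rintro ⟨l, ⟨h1, h2⟩, hc, hd⟩
    exact ⟨l, ⟨h1, h2⟩, hc, by rw [← splitTab_getD a b n m (m + 1 - l) (by omega)]; exact hd⟩
  · rintro ⟨l, ⟨h1, h2⟩, hc, hd⟩
    exact ⟨l, ⟨h1, h2⟩, hc, by rw [splitTab_getD a b n m (m + 1 - l) (by omega)]; exact hd⟩

-- one step of A's inner loop, as a pure boolean identity
theorem ite_or_branch (x y m r : Bool) (memo S : List Bool) :
    (if (!x || !y) = true then (if r = true then S else memo)
     else if m = true then S else (if r = true then S else memo))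
    = if ((x && y) && m || r) = true then S else memo := by
  cases x <;> cases y <;> cases m <;> cases r <;> simp

theorem inner_eq (a b : List Char) (memo : List Bool) (i : Nat) :
    ∀ ks : List Nat, can_part_inner a b memo i ks =
      if ks.any (fun kk => condK a b i kk && memo.getD (kk + 1) false)
        then memo.set i true else memo := by
  intro ks
  induction ks with
  | nil => simp [can_part_inner]
  | cons k ks ih =>
    rw [show can_part_inner a b memo i (k :: ks) =
        (if (!(words.contains (PySem.List.slice a (some (i : Int)) (some ((k : Int) + 1)))) ||
             !(words.contains (PySem.List.slice b (some (i : Int)) (some ((k : Int) + 1))))) = true then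
           can_part_inner a b memo i ks
         else if memo.getD (k + 1) false = true then memo.set i true
         else can_part_inner a b memo i ks) from rfl]
    rw [List.any_cons, ih]
    exact ite_or_branch _ _ _ _ _ _

theorem outer_inv (a b : List Char) (n : Nat) :
    ∀ m, m ≤ n → ∀ memo : List Bool, memo.length = n + 1 →
      (∀ j, j ≤ n → memo.getD j false = if m ≤ j then splitF a b n (n - j) else false) →
      ∀ j, j ≤ n → (can_part_outer a b n m memo).getD j false = splitF a b n (n - j) := by
  intro m
  induction m with
  | zero =>
    intro _ memo _ hinv j hj
    simpa using hinv j hj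
  | succ m ih =>
    intro hm memo hlen hinv j hj
    show (can_part_outer a b n m
        (can_part_inner a b memo m (List.range' m (n - m)))).getD j false = _
    have hkey : (List.range' m (n - m)).any (fun kk => condK a b m kk && memo.getD (kk + 1) false)
        = splitF a b n (n - m) := by
      obtain ⟨M, hM⟩ : ∃ M, n - m = M + 1 := ⟨n - m - 1, by omega⟩
      have hnm : n - (M + 1) = m := by omega
      rw [hM, splitF_succ, hnm]
      apply Bool.eq_iff_iff.mpr
      simp only [List.any_eq_true, List.mem_range'_1, Bool.and_eq_true]
      constructor
      · rintro ⟨kk, ⟨hk1, hk2⟩, hcond, hmem⟩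
        refine ⟨kk + 1 - m, ⟨by omega, by omega⟩, ?_, ?_⟩
        · have hcast : (m : Int) + ((kk + 1 - m : Nat) : Int) = (kk : Int) + 1 := by omega
          unfold condW
          rw [hcast]
          unfold condK at hcond
          exact hcond
        · have hmemo := hinv (kk + 1) (by omega)
          rw [if_pos (by omega : m + 1 ≤ kk + 1)] at hmemo
          have hsp : splitF a b n (n - (kk + 1)) = true := by rw [← hmemo]; exact hmem
          have heq : M + 1 - (kk + 1 - m) = n - (kk + 1) := by omega
          rw [heq]
          exact hsp
      · rintro ⟨l, ⟨hl1, hl2⟩, hcond, hsp⟩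
        refine ⟨m + l - 1, ⟨by omega, by omega⟩, ?_, ?_⟩
        · unfold condK
          unfold condW at hcond
          have hcast : ((m + l - 1 : Nat) : Int) + 1 = (m : Int) + (l : Int) := by omega
          rw [hcast]
          exact hcond
        · have hmemo := hinv (m + l - 1 + 1) (by omega)
          rw [if_pos (by omega)] at hmemo
          rw [hmemo]
          have heq : n - (m + l - 1 + 1) = M + 1 - l := by omega
          rw [heq]
          exact hsp
    have hinner := inner_eq a b memo m (List.range' m (n - m))
    rw [hkey] at hinner
    refine ih (by omega) _ ?_ ?_ j hj
    · rw [hinner]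
      split_ifs <;> simp [hlen]
    · intro j' hj'
      rw [hinner]
      have hmemo := hinv j' hj'
      by_cases hjm : j' = m
      · by_cases hsp : splitF a b n (n - m) = true
        · rw [if_pos hsp, hjm, getD_set_self _ _ _ (by rw [hlen]; omega),
              if_pos (le_refl _), hsp]
        · rw [if_neg hsp, hmemo, hjm, if_neg (show ¬ (m + 1 ≤ m) by omega), if_pos (le_refl _)]
          simp only [Bool.not_eq_true] at hsp
          exact hsp.symm
      · by_cases hsp : splitF a b n (n - m) = true
        · rw [if_pos hsp, getD_set_ne _ _ _ _ (fun h => hjm h.symm), hmemo]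
          by_cases hmj : m ≤ j'
          · rw [if_pos (show m + 1 ≤ j' by omega), if_pos hmj]
          · rw [if_neg (show ¬ (m + 1 ≤ j') by omega), if_neg hmj]
        · rw [if_neg hsp, hmemo]
          by_cases hmj : m ≤ j'
          · rw [if_pos (show m + 1 ≤ j' by omega), if_pos hmj]
          · rw [if_neg (show ¬ (m + 1 ≤ j') by omega), if_neg hmj]

theorem can_part_eq (A B : String) :
    can_part A B = splitF A.toList B.toList A.toList.length A.toList.length := by
  show (can_part_outer A.toList B.toList A.toList.length A.toList.length
      ((List.replicate (A.toList.length + 1) false).set A.toList.length true)).getD 0 false = _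
  have h := outer_inv A.toList B.toList A.toList.length A.toList.length (le_refl _)
      ((List.replicate (A.toList.length + 1) false).set A.toList.length true) (by simp)
      (by
        intro j hj
        by_cases hjn : j = A.toList.length
        · rw [hjn, getD_set_self _ _ _ (by simp), if_pos (le_refl _), Nat.sub_self, splitF_zero]
        · rw [getD_set_ne _ _ _ _ (fun h => hjn h.symm),
              List.getD_replicate _ (by omega),
              if_neg (show ¬ (A.toList.length ≤ j) by omega)])
      0 (Nat.zero_le _)
  rw [h, Nat.sub_zero]

-- B's loop body as a named function (definitionally B's lambda, with wmax evaluated)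
def bstep (a b : List Char) (n wmax : Nat) : List Bool → Nat → List Bool :=
  fun dp m => dp ++ [((List.range' 1 (min wmax m)).any (fun l =>
      words.contains (PySem.List.slice a (some ((n - m : Nat) : Int)) (some (((n - m : Nat) : Int) + (l : Int)))) &&
      words.contains (PySem.List.slice b (some ((n - m : Nat) : Int)) (some (((n - m : Nat) : Int) + (l : Int)))) &&
      dp.getD (m - l) false))]

theorem dp_eq (a b : List Char) (n : Nat) (ha : a.length = n) :
    ∀ m, m ≤ n →
      (List.range' 1 m).foldl (bstep a b n 7) [true] = (List.range (m + 1)).map (splitF a b n) := by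
  intro m
  induction m with
  | zero =>
    intro _
    rfl
  | succ m ih =>
    intro hm
    rw [show List.range' 1 (m + 1) = List.range' 1 m ++ [1 + m] from by
          simpa using List.range'_concat (s := 1) (n := m) (step := 1)]
    rw [List.foldl_append, ih (by omega), show (1 : Nat) + m = m + 1 from by omega]
    simp only [List.foldl_cons, List.foldl_nil, bstep]
    rw [show List.range (m + 1 + 1) = List.range (m + 1) ++ [m + 1] from List.range_succ,
        List.map_append]
    simp only [List.map_cons, List.map_nil]
    congr 1
    congr 1
    rw [splitF_succ]
    apply Bool.eq_iff_iff.mpr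
    simp only [List.any_eq_true, List.mem_range'_1, Bool.and_eq_true]
    constructor
    · rintro ⟨l, ⟨hl1, hl2⟩, ⟨hca, hcb⟩, hdp⟩
      refine ⟨l, ⟨hl1, by omega⟩, ?_, ?_⟩
      · unfold condW
        rw [Bool.and_eq_true]
        exact ⟨hca, hcb⟩
      · rw [PySem.List.getD_map_range _ _ _ _ (by omega)] at hdp
        exact hdp
    · rintro ⟨l, ⟨hl1, hl2⟩, hcw, hsp⟩
      unfold condW at hcw
      rw [Bool.and_eq_true] at hcw
      obtain ⟨hca, hcb⟩ := hcw
      by_cases hl7 : l ≤ 7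
      · refine ⟨l, ⟨hl1, by omega⟩, ⟨hca, hcb⟩, ?_⟩
        rw [PySem.List.getD_map_range _ _ _ _ (by omega)]
        exact hsp
      · exfalso
        have hlen : (PySem.List.slice a (some ((n - (m + 1) : Nat) : Int))
            (some (((n - (m + 1) : Nat) : Int) + (l : Int)))).length = l := by
          rw [PySem.List.slice_natCast_add, List.length_take, List.length_drop, ha]
          omega
        have hfalse := contains_long _ (by rw [hlen]; omega)
        rw [hfalse] at hca
        simp at hca

theorem can_part_alt_eq (A B : String) :
    can_part_alt A B = splitF A.toList B.toList A.toList.length A.toList.length := by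
  show ((List.range' 1 A.toList.length).foldl
      (bstep A.toList B.toList A.toList.length (((words.map List.length).max?).getD 0))
      [true]).getD A.toList.length false = _
  rw [wmax_eq]
  rw [dp_eq A.toList B.toList A.toList.length rfl A.toList.length (le_refl _)]
  rw [PySem.List.getD_map_range _ _ _ _ (by omega)]

-- ===== VERDICT (by name: the statement is the Claim_ definition above) =====
theorem can_part_spec : Claim_equal_can_part := by
  intro A B _ _
  unfold Spec_can_part
  rw [can_part_eq, can_part_alt_eq]
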